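-- pv_equiv track=rewrite | github.com/AbstractEndeavors/abstract-ai | src/abstract_ai/gui_components/new_lay.py | return_range
-- ===== SOURCE A (Python) =====
-- def return_range(i=None, k=None, divisor=None, divisorAfter=None):
--     i = i or 0  # Default start is 0
--     k = k or 100  # Default end is 100
--
--     return [
--         j for j in range(i, k)
--         if (
--             divisor is None  # No divisor, return all numbers
--             or (divisorAfter is not None and j < divisorAfter)  # Before divisorAfter, all numbers included
--             or (divisorAfter is None or j >= divisorAfter and j % divisor == 0)  # Apply divisor after divisorAfter
--         )
--     ]
-- ===== SOURCE B (Python) =====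
-- def return_range(i=None, k=None, divisor=None, divisorAfter=None):
--     start = i or 0
--     end = k or 100
--     if divisor is None or divisorAfter is None:
--         # A includes every number when either is None
--         return list(range(start, end))
--     before = list(range(start, min(end, divisorAfter)))
--     t = max(start, divisorAfter)
--     if end <= t:
--         return before
--     d = abs(divisor)
--     first = -(-t // d) * d  # least multiple of d that is >= t (ZeroDivisionError for divisor == 0, as in A)
--     return before + list(range(first, end, d))
-- ===== Notes on version B (the rewrite author's own statement) =====
-- stated objective: faster
-- what changed: Replaces the single per-element filtered comprehension by an early return of the full range when divisor or divisorAfter is None, and otherwise by two direct range constructions: a plain range up to divisorAfter plus an arithmetic stepped range of multiples of |divisor| computed by ceiling division, with no per-element divisibility test.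
-- outside the precondition, e.g. on return_range(0, 10, 0, 5): A raises ZeroDivisionError, B raises ZeroDivisionError
import Mathlib
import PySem

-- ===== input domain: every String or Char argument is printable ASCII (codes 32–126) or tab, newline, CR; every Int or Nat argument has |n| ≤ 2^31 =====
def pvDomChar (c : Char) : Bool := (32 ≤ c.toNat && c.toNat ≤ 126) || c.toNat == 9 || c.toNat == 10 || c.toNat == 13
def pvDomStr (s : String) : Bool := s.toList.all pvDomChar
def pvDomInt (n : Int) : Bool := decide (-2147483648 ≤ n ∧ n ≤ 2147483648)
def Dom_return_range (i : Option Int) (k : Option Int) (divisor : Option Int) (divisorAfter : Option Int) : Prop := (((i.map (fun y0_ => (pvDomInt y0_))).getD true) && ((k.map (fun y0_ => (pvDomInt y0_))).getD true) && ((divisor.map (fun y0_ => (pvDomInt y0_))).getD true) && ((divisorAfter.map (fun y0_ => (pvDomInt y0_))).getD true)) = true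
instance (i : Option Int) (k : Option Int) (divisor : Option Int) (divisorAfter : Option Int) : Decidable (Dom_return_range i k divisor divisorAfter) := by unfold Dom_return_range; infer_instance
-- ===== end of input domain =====

-- B replaces the per-element filtered comprehension by an early full-range return plus two direct
-- range constructions (plain prefix + stepped range of multiples via ceiling division), avoiding the per-element test.


-- ===== PORT A =====
-- `i = i or 0` : None and 0 are falsy, so both become 0
def effStart (i : Option Int) : Int :=
  match i with
  | none => 0
  | some v => if v = 0 then 0 else v

-- `k = k or 100` : None and 0 both become 100
def effEnd (k : Option Int) : Int :=
  match k with
  | none => 100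
  | some v => if v = 0 then 100 else v

def return_range (i : Option Int) (k : Option Int) (divisor : Option Int) (divisorAfter : Option Int) : List Int :=
  let s := effStart i
  let e := effEnd k
  (PySem.List.pyRange s e 1).filter (fun j =>
    match divisor, divisorAfter with
    | none, _ => true                 -- divisor is None
    | some _, none => true            -- second or-clause false, third clause: divisorAfter is None
    | some dv, some da =>             -- j < divisorAfter  or  (j >= divisorAfter and j % divisor == 0)
        decide (j < da) || (decide (da ≤ j) && decide (PySem.Int.mod j dv = 0)))

-- ===== PORT B =====
def return_range_alt (i : Option Int) (k : Option Int) (divisor : Option Int) (divisorAfter : Option Int) : List Int :=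
  match divisor, divisorAfter with
  | some dv, some da =>
      let start := effStart i
      let e := effEnd k
      let before := PySem.List.pyRange start (min e da) 1
      let t := max start da
      if e ≤ t then before
      else
        let d := |dv|
        let first := -(PySem.Int.floordiv (-t) d) * d
        before ++ PySem.List.pyRange first e d
  | _, _ => PySem.List.pyRange (effStart i) (effEnd k) 1

-- ===== PRECONDITION & SPEC =====
-- Pre_ excludes exactly the inputs where Python A raises ZeroDivisionError: divisor == 0,
-- divisorAfter set, and some element of the range reaches the `j % divisor` test.
def Pre_return_range (i : Option Int) (k : Option Int) (divisor : Option Int) (divisorAfter : Option Int) : Prop :=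
  divisor = some 0 →
    divisorAfter.all (fun da => decide (effEnd k ≤ max (effStart i) da)) = true
instance (i : Option Int) (k : Option Int) (divisor : Option Int) (divisorAfter : Option Int) : Decidable (Pre_return_range i k divisor divisorAfter) := by unfold Pre_return_range; infer_instance

def pvWitness_return_range : Option Int × Option Int × Option Int × Option Int := (some 1, some 10, some 2, some 5)

def Spec_return_range (i : Option Int) (k : Option Int) (divisor : Option Int) (divisorAfter : Option Int) (out : List Int) : Prop := out = return_range_alt i k divisor divisorAfter
instance (i : Option Int) (k : Option Int) (divisor : Option Int) (divisorAfter : Option Int) (out : List Int) : Decidable (Spec_return_range i k divisor divisorAfter out) := by unfold Spec_return_range; infer_instance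

-- ===== CLAIM (what is proved, stated in full; the proofs are below) =====
def Claim_equal_return_range : Prop := ∀ (i : Option Int) (k : Option Int) (divisor : Option Int) (divisorAfter : Option Int), Dom_return_range i k divisor divisorAfter → Pre_return_range i k divisor divisorAfter → Spec_return_range i k divisor divisorAfter (return_range i k divisor divisorAfter)

-- ===== LEMMAS AND PROOFS =====

theorem pyRange_pos_nil (d a b : Int) (hd : 0 < d) (h : b ≤ a) :
    PySem.List.pyRange a b d = [] := by
  rw [PySem.List.pyRange_of_pos _ _ hd, if_neg (by omega)]
  simp

theorem pyRange_pos_cons (d a b : Int) (hd : 0 < d) (h : a < b) :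
    PySem.List.pyRange a b d = a :: PySem.List.pyRange (a + d) b d := by
  rw [PySem.List.pyRange_of_pos _ _ hd, PySem.List.pyRange_of_pos _ _ hd, if_pos h]
  have hcount : (if a + d < b then ((b - (a + d) + d - 1) / d).toNat else 0) + 1
      = ((b - a + d - 1) / d).toNat := by
    have h1 : b - a + d - 1 = (b - a - 1) + 1 * d := by ring
    have h2 : b - (a + d) + d - 1 = b - a - 1 := by ring
    rw [h1, Int.add_mul_ediv_right _ _ (ne_of_gt hd), h2]
    by_cases hab : a + d < b
    · rw [if_pos hab]
      have hq : 0 ≤ (b - a - 1) / d := Int.ediv_nonneg (by omega) hd.le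
      omega
    · rw [if_neg hab]
      have hz : (b - a - 1) / d = 0 := Int.ediv_eq_zero_of_lt (by omega) (by omega)
      omega
  rw [← hcount, List.range_succ_eq_map, List.map_cons, List.map_map]
  refine congrArg₂ List.cons (by simp) ?_
  exact List.map_congr_left (fun x _ => by simp [Function.comp]; ring)

theorem ceil_bounds (d m : Int) (hd : 0 < d) :
    m ≤ -(PySem.Int.floordiv (-m) d) * d ∧ -(PySem.Int.floordiv (-m) d) * d < m + d := by
  have h := (PySem.Int.neg_floordiv_neg_eq_iff_of_pos (a := m) (b := d)
    (q := -(PySem.Int.floordiv (-m) d)) hd).mp rfl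
  constructor
  · exact h.2
  · nlinarith [h.1]

theorem ceil_dvd (d m : Int) (hd : 0 < d) (h : d ∣ m) :
    -(PySem.Int.floordiv (-m) d) * d = m := by
  obtain ⟨c, rfl⟩ := h
  have : -(PySem.Int.floordiv (-(d * c)) d) = c := by
    rw [PySem.Int.neg_floordiv_neg_eq_iff_of_pos hd]
    constructor <;> nlinarith
  rw [this]; ring

theorem ceil_succ_dvd (d m : Int) (hd : 0 < d) (h : d ∣ m) :
    -(PySem.Int.floordiv (-(m + 1)) d) * d = m + d := by
  obtain ⟨c, rfl⟩ := h
  have : -(PySem.Int.floordiv (-(d * c + 1)) d) = c + 1 := by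
    rw [PySem.Int.neg_floordiv_neg_eq_iff_of_pos hd]
    constructor <;> nlinarith
  rw [this]; ring

theorem ceil_succ_not_dvd (d m : Int) (hd : 0 < d) (h : ¬ d ∣ m) :
    -(PySem.Int.floordiv (-(m + 1)) d) * d = -(PySem.Int.floordiv (-m) d) * d := by
  obtain ⟨h1, h2⟩ := ceil_bounds d m hd
  have hne : m ≠ -(PySem.Int.floordiv (-m) d) * d := by
    intro he
    have hdd : d ∣ -(PySem.Int.floordiv (-m) d) * d := dvd_mul_left d _
    rw [← he] at hdd
    exact h hdd
  have : -(PySem.Int.floordiv (-(m + 1)) d) = -(PySem.Int.floordiv (-m) d) := by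
    rw [PySem.Int.neg_floordiv_neg_eq_iff_of_pos hd]
    constructor <;> nlinarith [lt_of_le_of_ne h1 hne]
  rw [this]

theorem filter_mult_eq_stepped (d e : Int) (hd : 0 < d) :
    ∀ (n : Nat) (m : Int), e - m ≤ n →
      (PySem.List.pyRange m e 1).filter (fun j => decide (PySem.Int.mod j d = 0))
        = PySem.List.pyRange (-(PySem.Int.floordiv (-m) d) * d) e d := by
  intro n
  induction n with
  | zero =>
    intro m hm
    rw [PySem.List.pyRange_one_eq_nil (by omega),
      pyRange_pos_nil d _ e hd (le_trans (by omega) (ceil_bounds d m hd).1)]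
    rfl
  | succ n ih =>
    intro m hm
    by_cases he : e ≤ m
    · rw [PySem.List.pyRange_one_eq_nil he,
        pyRange_pos_nil d _ e hd (le_trans he (ceil_bounds d m hd).1)]
      rfl
    · rw [PySem.List.pyRange_one_cons (by omega), List.filter_cons]
      by_cases hdvd : d ∣ m
      · rw [if_pos (by simp [PySem.Int.mod_eq_zero_iff_dvd, hdvd]),
          ih (m + 1) (by omega), ceil_succ_dvd d m hd hdvd,
          ceil_dvd d m hd hdvd, pyRange_pos_cons d m e hd (by omega)]
      · rw [if_neg (by simp [PySem.Int.mod_eq_zero_iff_dvd, hdvd]),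
          ih (m + 1) (by omega), ceil_succ_not_dvd d m hd hdvd]

theorem pyRange_one_max (s x : Int) :
    PySem.List.pyRange s x 1 = PySem.List.pyRange s (max s x) 1 := by
  by_cases h : s ≤ x
  · rw [max_eq_right h]
  · rw [PySem.List.pyRange_one_eq_nil (by omega), PySem.List.pyRange_one_eq_nil (by omega)]

-- ===== VERDICT (by name: the statement is the Claim_ definition above) =====
theorem return_range_spec : Claim_equal_return_range := by
  intro i k divisor divisorAfter _ hpre
  unfold Spec_return_range return_range return_range_alt
  match divisor, divisorAfter with
  | none, none => simp
  | none, some da => simp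
  | some dv, none => simp
  | some dv, some da =>
    simp only []
    set s := effStart i with hs
    set e := effEnd k with he
    by_cases het : e ≤ max s da
    · rw [if_pos het]
      by_cases hse : e ≤ s
      · rw [PySem.List.pyRange_one_eq_nil hse, PySem.List.pyRange_one_eq_nil (by omega)]
        rfl
      · have hda : e ≤ da := by omega
        rw [min_eq_left hda, List.filter_eq_self.mpr]
        intro j hj
        have := (PySem.List.mem_pyRange_one).mp hj
        simp only [decide_eq_true_eq, Bool.or_eq_true]
        left; omega
    · rw [if_neg het]
      -- divisor = 0 is excluded by Pre_ in this branch
      have hdv : dv ≠ 0 := by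
        intro h0
        have := hpre (by rw [h0])
        simp only [Option.all_some, decide_eq_true_eq] at this
        omega
      have hd : 0 < |dv| := abs_pos.mpr hdv
      have hsplit : s ≤ max s da ∧ max s da ≤ e := by omega
      rw [PySem.List.pyRange_one_append s (max s da) e hsplit.1 hsplit.2, List.filter_append]
      have hbefore : (PySem.List.pyRange s (max s da) 1).filter (fun j =>
          decide (j < da) || (decide (da ≤ j) && decide (PySem.Int.mod j dv = 0)))
          = PySem.List.pyRange s (min e da) 1 := by
        rw [min_eq_right (by omega), pyRange_one_max s da, List.filter_eq_self.mpr]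
        intro j hj
        have := (PySem.List.mem_pyRange_one).mp hj
        simp only [decide_eq_true_eq, Bool.or_eq_true]
        left; omega
      have hafter : (PySem.List.pyRange (max s da) e 1).filter (fun j =>
          decide (j < da) || (decide (da ≤ j) && decide (PySem.Int.mod j dv = 0)))
          = PySem.List.pyRange (-(PySem.Int.floordiv (-(max s da)) |dv|) * |dv|) e |dv| := by
        rw [List.filter_congr (q := fun j => decide (PySem.Int.mod j |dv| = 0))]
        · exact filter_mult_eq_stepped |dv| e hd (e - max s da).toNat (max s da) (by omega)
        · intro j hj
          have := (PySem.List.mem_pyRange_one).mp hj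
          have h1 : ¬ (j < da) := by omega
          have h2 : da ≤ j := by omega
          simp [h1, h2, PySem.Int.mod_eq_zero_iff_dvd, abs_dvd]
      rw [hbefore, hafter]
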